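-- pv_equiv track=rewrite | github.com/MochAndimas/network_monitoring | dashboard/pages/4_History.py | _default_device_option_label
-- ===== SOURCE A (Python) =====
-- def _format_device_label(device: dict) -> str:
--     return f'{device["name"]} ({device["device_type"]})'
--
-- def _default_device_option_label(devices: list[dict]) -> str:
--     internet_targets = [device for device in devices if device.get("device_type") == "internet_target"]
--     if not internet_targets:
--         return "All Devices"
--
--     preferred_device = next(
--         (device for device in internet_targets if "myrepublic" in str(device.get("name", "")).lower()),
--         None,
--     )
--     if preferred_device:
--         return _format_device_label(preferred_device)
--
--     preferred_device = next(
--         (device for device in internet_targets if "isp" in str(device.get("name", "")).lower()),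
--         None,
--     )
--     if preferred_device:
--         return _format_device_label(preferred_device)
--
--     preferred_device = next(
--         (device for device in internet_targets if "mikrotik" not in str(device.get("name", "")).lower()),
--         None,
--     )
--     if preferred_device:
--         return _format_device_label(preferred_device)
--     return "All Devices"
-- ===== SOURCE B (Python) =====
-- def _default_device_option_label(devices: list[dict]) -> str:
--     # One pass: rank each internet_target device (0 myrepublic, 1 isp, 2 other
--     # non-mikrotik); keep the lowest-ranked, earliest device.
--     best_rank = None
--     best = None
--     for device in devices:
--         if device.get("device_type") != "internet_target":
--             continue
--         name = str(device.get("name", "")).lower()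
--         if "myrepublic" in name:
--             rank = 0
--         elif "isp" in name:
--             rank = 1
--         elif "mikrotik" not in name:
--             rank = 2
--         else:
--             continue
--         if best_rank is None or rank < best_rank:
--             best_rank = rank
--             best = device
--     if best is None:
--         return "All Devices"
--     return f'{best["name"]} ({best["device_type"]})'
-- ===== Notes on version B (the rewrite author's own statement) =====
-- stated objective: alternative
-- what changed: Replaced A's filter-then-three-sequential-scans (next over a myrepublic generator, then an isp generator, then a non-mikrotik generator) by a single pass that assigns each internet_target device a priority rank (0 myrepublic, 1 isp, 2 other non-mikrotik) and keeps the lowest-ranked earliest device.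
import Mathlib
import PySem

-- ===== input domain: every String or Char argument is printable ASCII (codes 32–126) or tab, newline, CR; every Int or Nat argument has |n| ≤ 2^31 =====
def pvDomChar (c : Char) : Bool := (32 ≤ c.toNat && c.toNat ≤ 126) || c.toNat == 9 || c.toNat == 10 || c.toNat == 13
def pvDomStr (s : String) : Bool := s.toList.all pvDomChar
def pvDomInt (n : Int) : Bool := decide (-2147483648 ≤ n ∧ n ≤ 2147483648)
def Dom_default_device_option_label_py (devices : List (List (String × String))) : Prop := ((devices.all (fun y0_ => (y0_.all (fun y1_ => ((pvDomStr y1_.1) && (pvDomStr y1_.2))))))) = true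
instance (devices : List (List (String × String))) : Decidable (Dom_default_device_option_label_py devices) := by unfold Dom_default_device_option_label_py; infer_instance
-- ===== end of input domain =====

-- B replaces A's filter + three sequential scans by one pass tracking the lowest-ranked earliest
-- internet_target device (rank 0 myrepublic, 1 isp, 2 other non-mikrotik); objective: alternative.


-- ===== PORT A =====
-- device.get("device_type") == "internet_target"
def pvIsInternet (d : List (String × String)) : Bool :=
  (PySem.Dict.get? (PySem.Dict.mk d) "device_type") == some "internet_target"

-- str(device.get("name", "")).lower()  (values are already strings, so str() is the identity)
def pvLowName (d : List (String × String)) : String :=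
  PySem.Str.lower ((PySem.Dict.get? (PySem.Dict.mk d) "name").getD "")

-- the three name tests of A's generator conditions ("myrepublic" in …, "isp" in …, "mikrotik" in …)
def pvP0 (d : List (String × String)) : Bool := PySem.Str.isIn "myrepublic" (pvLowName d)
def pvP1 (d : List (String × String)) : Bool := PySem.Str.isIn "isp" (pvLowName d)
def pvPk (d : List (String × String)) : Bool := PySem.Str.isIn "mikrotik" (pvLowName d)

-- _format_device_label; device["name"] raises KeyError when absent — Pre_ excludes that,
-- so the getD "" default is never reached on admitted inputs.
def pvFmt (d : List (String × String)) : String :=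
  ((PySem.Dict.get? (PySem.Dict.mk d) "name").getD "") ++ " (" ++
    ((PySem.Dict.get? (PySem.Dict.mk d) "device_type").getD "") ++ ")"

def default_device_option_label_py (devices : List (List (String × String))) : String :=
  let internet_targets := devices.filter pvIsInternet
  if internet_targets.isEmpty then "All Devices"
  else
    match internet_targets.find? (fun d => pvP0 d) with
    | some d => pvFmt d
    | none =>
      match internet_targets.find? (fun d => pvP1 d) with
      | some d => pvFmt d
      | none =>
        match internet_targets.find? (fun d => !(pvPk d)) with
        | some d => pvFmt d
        | none => "All Devices"

-- ===== PORT B =====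
-- the rank of a device, none = skipped by the loop ('continue')
def pvRank (d : List (String × String)) : Option Nat :=
  if !(pvIsInternet d) then none
  else if pvP0 d then some 0
  else if pvP1 d then some 1
  else if !(pvPk d) then some 2
  else none

-- loop body: update (best_rank, best)
def pvStep (best : Option (Nat × List (String × String))) (d : List (String × String)) :
    Option (Nat × List (String × String)) :=
  match pvRank d with
  | none => best
  | some r =>
    match best with
    | none => some (r, d)
    | some (br, bd) => if r < br then some (r, d) else some (br, bd)

def default_device_option_label_py_alt (devices : List (List (String × String))) : String :=
  match devices.foldl pvStep none with
  | none => "All Devices"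
  | some (_, d) => pvFmt d

-- ===== PRECONDITION & SPEC =====
-- Pre_ excludes lists containing an internet_target device without a "name" key: when such a
-- device is selected, A raises KeyError in _format_device_label (B raises there too).
def Pre_default_device_option_label_py (devices : List (List (String × String))) : Prop :=
  ∀ d ∈ devices,
    PySem.Dict.get? (PySem.Dict.mk d) "device_type" = some "internet_target" →
    PySem.Dict.contains (PySem.Dict.mk d) "name" = true
instance (devices : List (List (String × String))) : Decidable (Pre_default_device_option_label_py devices) := by unfold Pre_default_device_option_label_py; infer_instance

def pvWitness_default_device_option_label_py : (List (List (String × String))) :=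
  [[("device_type", "internet_target"), ("name", "MyRepublic WAN")],
   [("device_type", "router"), ("name", "core")]]

def Spec_default_device_option_label_py (devices : List (List (String × String))) (out : String) : Prop := out = default_device_option_label_py_alt devices
instance (devices : List (List (String × String))) (out : String) : Decidable (Spec_default_device_option_label_py devices out) := by unfold Spec_default_device_option_label_py; infer_instance

-- ===== CLAIM (what is proved, stated in full; the proofs are below) =====
def Claim_equal_default_device_option_label_py : Prop := ∀ (devices : List (List (String × String))), Dom_default_device_option_label_py devices → Pre_default_device_option_label_py devices → Spec_default_device_option_label_py devices (default_device_option_label_py devices)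

-- ===== LEMMAS AND PROOFS =====

-- 'unit' of a device for the one-pass loop, and the order-biased minimum it maintains
def pvUnit (d : List (String × String)) : Option (Nat × List (String × String)) :=
  (pvRank d).map (fun r => (r, d))

def pvCombine (a b : Option (Nat × List (String × String))) :
    Option (Nat × List (String × String)) :=
  match a with
  | none => b
  | some (r1, d1) =>
    match b with
    | none => some (r1, d1)
    | some (r2, d2) => if r2 < r1 then some (r2, d2) else some (r1, d1)

-- the whole list folded from the right with pvCombine
def pvMr (l : List (List (String × String))) : Option (Nat × List (String × String)) :=
  l.foldr (fun d m => pvCombine (pvUnit d) m) none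

-- A's cascade, phrased with the disjoint tier predicates over the raw list
def pvCasc (l : List (List (String × String))) : Option (Nat × List (String × String)) :=
  match l.find? (fun d => pvIsInternet d && pvP0 d) with
  | some d => some (0, d)
  | none =>
    match l.find? (fun d => pvIsInternet d && !pvP0 d && pvP1 d) with
    | some d => some (1, d)
    | none =>
      match l.find? (fun d => pvIsInternet d && !pvP0 d && !pvP1 d && !pvPk d) with
      | some d => some (2, d)
      | none => none

def pvRender (m : Option (Nat × List (String × String))) : String :=
  match m with
  | none => "All Devices"
  | some (_, d) => pvFmt d

theorem pvStep_eq (acc : Option (Nat × List (String × String)))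
    (d : List (String × String)) : pvStep acc d = pvCombine acc (pvUnit d) := by
  unfold pvStep pvUnit pvCombine
  rcases pvRank d with _ | r <;> rcases acc with _ | ⟨br, bd⟩ <;> rfl

theorem pvCombine_assoc (a b c : Option (Nat × List (String × String))) :
    pvCombine (pvCombine a b) c = pvCombine a (pvCombine b c) := by
  rcases a with _ | ⟨r1, d1⟩ <;> rcases b with _ | ⟨r2, d2⟩ <;> rcases c with _ | ⟨r3, d3⟩ <;>
    simp only [pvCombine] <;> split_ifs <;>
    (try simp only [pvCombine]) <;> (try split_ifs) <;> first | rfl | omega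

theorem pvCombine_none_right (a : Option (Nat × List (String × String))) :
    pvCombine a none = a := by
  rcases a with _ | ⟨r, d⟩ <;> rfl

theorem pvCombine_zero (x : List (String × String))
    (m : Option (Nat × List (String × String))) :
    pvCombine (some (0, x)) m = some (0, x) := by
  rcases m with _ | ⟨r, e⟩ <;> simp [pvCombine]

theorem pvFoldl_eq (l : List (List (String × String)))
    (acc : Option (Nat × List (String × String))) :
    l.foldl pvStep acc = pvCombine acc (pvMr l) := by
  induction l generalizing acc with
  | nil => simp [pvMr, pvCombine_none_right]
  | cons d l ih =>
    simp only [List.foldl_cons, ih, pvMr, List.foldr_cons, pvStep_eq, pvCombine_assoc]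

theorem pvMr_eq_casc (l : List (List (String × String))) : pvMr l = pvCasc l := by
  induction l with
  | nil => rfl
  | cons d l ih =>
    have hstep : pvMr (d :: l) = pvCombine (pvUnit d) (pvMr l) := rfl
    rw [hstep, ih]
    cases hq : pvIsInternet d with
    | false =>
      -- not an internet target: the loop skips d and every tier predicate is false on d
      have hu : pvUnit d = none := by unfold pvUnit pvRank; rw [hq]; rfl
      have hA : (pvIsInternet d && pvP0 d) = false := by simp [hq]
      have hB : (pvIsInternet d && !pvP0 d && pvP1 d) = false := by simp [hq]
      have hC : (pvIsInternet d && !pvP0 d && !pvP1 d && !pvPk d) = false := by simp [hq]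
      rw [hu]
      show pvCasc l = pvCasc (d :: l)
      unfold pvCasc
      simp only [List.find?_cons, hA, hB, hC]
    | true =>
      cases h0 : pvP0 d with
      | true =>
        -- rank 0: d wins outright
        have hu : pvUnit d = some (0, d) := by
          simp only [pvUnit, pvRank, hq, h0, Bool.not_true]; rfl
        have hA : (pvIsInternet d && pvP0 d) = true := by simp [hq, h0]
        rw [hu, pvCombine_zero]
        unfold pvCasc
        simp only [List.find?_cons, hA]
      | false =>
        cases h1 : pvP1 d with
        | true =>
          -- rank 1
          have hu : pvUnit d = some (1, d) := by
            simp only [pvUnit, pvRank, hq, h0, h1, Bool.not_true]; rfl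
          have hA : (pvIsInternet d && pvP0 d) = false := by simp [h0]
          have hB : (pvIsInternet d && !pvP0 d && pvP1 d) = true := by simp [hq, h0, h1]
          rw [hu]
          unfold pvCasc
          simp only [List.find?_cons, hA, hB]
          rcases hf0 : l.find? (fun d => pvIsInternet d && pvP0 d) with _ | e0 <;>
            rcases hf1 : l.find? (fun d => pvIsInternet d && !pvP0 d && pvP1 d) with _ | e1 <;>
            rcases hf2 : l.find? (fun d => pvIsInternet d && !pvP0 d && !pvP1 d && !pvPk d)
              with _ | e2 <;>
            simp [pvCombine]
        | false =>
          cases hk : pvPk d with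
          | false =>
            -- rank 2
            have hu : pvUnit d = some (2, d) := by
              simp only [pvUnit, pvRank, hq, h0, h1, hk, Bool.not_true]; rfl
            have hA : (pvIsInternet d && pvP0 d) = false := by simp [h0]
            have hB : (pvIsInternet d && !pvP0 d && pvP1 d) = false := by simp [h1]
            have hC : (pvIsInternet d && !pvP0 d && !pvP1 d && !pvPk d) = true := by simp [hq, h0, h1, hk]
            rw [hu]
            unfold pvCasc
            simp only [List.find?_cons, hA, hB, hC]
            rcases hf0 : l.find? (fun d => pvIsInternet d && pvP0 d) with _ | e0 <;>
              rcases hf1 : l.find? (fun d => pvIsInternet d && !pvP0 d && pvP1 d) with _ | e1 <;>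
              rcases hf2 : l.find? (fun d => pvIsInternet d && !pvP0 d && !pvP1 d && !pvPk d)
                with _ | e2 <;>
              simp [pvCombine]
          | true =>
            -- mikrotik-only name: the loop skips d, and no tier predicate holds on d
            have hu : pvUnit d = none := by
              simp only [pvUnit, pvRank, hq, h0, h1, hk, Bool.not_true]; rfl
            have hA : (pvIsInternet d && pvP0 d) = false := by simp [h0]
            have hB : (pvIsInternet d && !pvP0 d && pvP1 d) = false := by simp [h1]
            have hC : (pvIsInternet d && !pvP0 d && !pvP1 d && !pvPk d) = false := by simp [hk]
            rw [hu]
            show pvCasc l = pvCasc (d :: l)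
            unfold pvCasc
            simp only [List.find?_cons, hA, hB, hC]

theorem pvFind?_congr_mem {α : Type} (l : List α) (p q : α → Bool)
    (h : ∀ a ∈ l, p a = q a) : l.find? p = l.find? q := by
  induction l with
  | nil => rfl
  | cons a l ih =>
    have ha := h a (by simp)
    simp only [List.find?_cons, ha]
    cases hq : q a
    · exact ih (fun b hb => h b (by simp [hb]))
    · rfl

theorem pvA_eq_render (l : List (List (String × String))) :
    default_device_option_label_py l = pvRender (pvCasc l) := by
  unfold default_device_option_label_py pvRender pvCasc
  rcases hf0 : l.find? (fun d => pvIsInternet d && pvP0 d) with _ | e0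
  · have h0 : ∀ a ∈ l.filter pvIsInternet, pvP0 a = false := by
      intro a ha
      have hm := List.mem_filter.mp ha
      have := List.find?_eq_none.mp hf0 a hm.1
      simpa [hm.2] using this
    rcases hf1 : l.find? (fun d => pvIsInternet d && !pvP0 d && pvP1 d) with _ | e1
    · have h1 : ∀ a ∈ l.filter pvIsInternet, pvP1 a = false := by
        intro a ha
        have hm := List.mem_filter.mp ha
        have := List.find?_eq_none.mp hf1 a hm.1
        simpa [hm.2, h0 a ha] using this
      rcases hf2 : l.find? (fun d => pvIsInternet d && !pvP0 d && !pvP1 d && !pvPk d) with _ | e2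
      · -- nothing selectable: both sides are "All Devices" whether the filter is empty or not
        have h2 : (l.filter pvIsInternet).find? (fun d => !pvPk d) = none := by
          apply List.find?_eq_none.mpr
          intro a ha
          have hm := List.mem_filter.mp ha
          have := List.find?_eq_none.mp hf2 a hm.1
          simp only [hm.2, h0 a ha, h1 a ha, Bool.not_false, Bool.true_and, Bool.and_true] at this
          simpa using this
        have g0 : (l.filter pvIsInternet).find? (fun d => pvP0 d) = none :=
          List.find?_eq_none.mpr (fun a ha => by simp [h0 a ha])
        have g1 : (l.filter pvIsInternet).find? (fun d => pvP1 d) = none :=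
          List.find?_eq_none.mpr (fun a ha => by simp [h1 a ha])
        cases hemp : (l.filter pvIsInternet).isEmpty
        · simp only [hemp, Bool.false_eq_true, if_false, g0, g1, h2]
        · simp only [hemp, if_true]
      · -- tier 2 hit
        have hmem : e2 ∈ l := List.mem_of_find?_eq_some hf2
        have he2 := List.find?_some hf2
        simp only [Bool.and_eq_true, Bool.not_eq_true'] at he2
        have hmf : e2 ∈ l.filter pvIsInternet := List.mem_filter.mpr ⟨hmem, he2.1.1.1⟩
        have hne : (l.filter pvIsInternet).isEmpty = false := by
          cases hemp : (l.filter pvIsInternet).isEmpty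
          · rfl
          · rw [List.isEmpty_iff] at hemp
            rw [hemp] at hmf
            cases hmf
        have g0 : (l.filter pvIsInternet).find? (fun d => pvP0 d) = none :=
          List.find?_eq_none.mpr (fun a ha => by simp [h0 a ha])
        have g1 : (l.filter pvIsInternet).find? (fun d => pvP1 d) = none :=
          List.find?_eq_none.mpr (fun a ha => by simp [h1 a ha])
        have g2 : (l.filter pvIsInternet).find? (fun d => !pvPk d) =
            l.find? (fun d => pvIsInternet d && !pvP0 d && !pvP1 d && !pvPk d) := by
          rw [List.find?_filter]
          apply pvFind?_congr_mem
          intro a ha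
          cases hqa : pvIsInternet a
          · simp
          · have h0a : pvP0 a = false := by
              have := List.find?_eq_none.mp hf0 a ha; simpa [hqa] using this
            have h1a : pvP1 a = false := by
              have := List.find?_eq_none.mp hf1 a ha; simpa [hqa, h0a] using this
            simp [h0a, h1a]
        simp only [hne, Bool.false_eq_true, if_false, g0, g1, g2, hf2]
    · -- tier 1 hit
      have hmem : e1 ∈ l := List.mem_of_find?_eq_some hf1
      have he1 := List.find?_some hf1
      simp only [Bool.and_eq_true, Bool.not_eq_true'] at he1
      have hmf : e1 ∈ l.filter pvIsInternet := List.mem_filter.mpr ⟨hmem, he1.1.1⟩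
      have hne : (l.filter pvIsInternet).isEmpty = false := by
        cases hemp : (l.filter pvIsInternet).isEmpty
        · rfl
        · rw [List.isEmpty_iff] at hemp
          rw [hemp] at hmf
          cases hmf
      have g0 : (l.filter pvIsInternet).find? (fun d => pvP0 d) = none :=
        List.find?_eq_none.mpr (fun a ha => by simp [h0 a ha])
      have g1 : (l.filter pvIsInternet).find? (fun d => pvP1 d) =
          l.find? (fun d => pvIsInternet d && !pvP0 d && pvP1 d) := by
        rw [List.find?_filter]
        apply pvFind?_congr_mem
        intro a ha
        cases hqa : pvIsInternet a
        · simp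
        · have h0a : pvP0 a = false := by
            have := List.find?_eq_none.mp hf0 a ha; simpa [hqa] using this
          simp [h0a]
      simp only [hne, Bool.false_eq_true, if_false, g0, g1, hf1]
  · -- tier 0 hit
    have hmem : e0 ∈ l := List.mem_of_find?_eq_some hf0
    have he0 := List.find?_some hf0
    simp only [Bool.and_eq_true] at he0
    have hmf : e0 ∈ l.filter pvIsInternet := List.mem_filter.mpr ⟨hmem, he0.1⟩
    have hne : (l.filter pvIsInternet).isEmpty = false := by
      cases hemp : (l.filter pvIsInternet).isEmpty
      · rfl
      · rw [List.isEmpty_iff] at hemp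
        rw [hemp] at hmf
        cases hmf
    have g0 : (l.filter pvIsInternet).find? (fun d => pvP0 d) =
        l.find? (fun d => pvIsInternet d && pvP0 d) := by
      rw [List.find?_filter]
      apply pvFind?_congr_mem
      intro a ha
      cases hqa : pvIsInternet a <;> simp
    simp only [hne, Bool.false_eq_true, if_false, g0, hf0]

-- ===== VERDICT (by name: the statement is the Claim_ definition above) =====
theorem default_device_option_label_py_spec : Claim_equal_default_device_option_label_py := by
  intro devices _ _
  unfold Spec_default_device_option_label_py
  rw [pvA_eq_render]
  unfold default_device_option_label_py_alt
  rw [pvFoldl_eq]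
  show pvRender (pvCasc devices) = _
  rw [show pvCombine none (pvMr devices) = pvMr devices from rfl, pvMr_eq_casc]
  rcases pvCasc devices with _ | ⟨r, d⟩ <;> rfl
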